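-- pv_equiv track=rewrite | github.com/Lazora27/Backtester-master | Indikatoren/Sonstige-Indikatoren/AutoHarmonicPattern/auto_harmonic_pattern.py | find_swing_points
-- ===== SOURCE A (Python) =====
-- def find_swing_points(prices, window=5):
--     """
--     Findet Swing-Punkte im Preischart.
--     """
--     if len(prices) < window * 2 + 1:
--         return []
--
--     swing_points = []
--     for i in range(window, len(prices) - window):
--         left_prices = prices[i-window:i]
--         right_prices = prices[i+1:i+window+1]
--         current_price = prices[i]
--
--         # Swing High
--         if (current_price > max(left_prices) and
--             current_price > max(right_prices)):
--             swing_points.append(('high', i, current_price))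
--
--         # Swing Low
--         elif (current_price < min(left_prices) and
--               current_price < min(right_prices)):
--             swing_points.append(('low', i, current_price))
--
--     return swing_points
-- ===== SOURCE B (Python) =====
-- from collections import deque
--
--
-- def _window_bests(prices, w, dominated):
--     # bests[j] = extremal value of prices[j:j+w], computed in O(n) with a
--     # monotonic deque of indices; dominated(a, b) means a may be discarded for b.
--     dq = deque()
--     out = []
--     for i, v in enumerate(prices):
--         while dq and dominated(prices[dq[-1]], v):
--             dq.pop()
--         dq.append(i)
--         if dq[0] <= i - w:
--             dq.popleft()
--         if i >= w - 1:
--             out.append(prices[dq[0]])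
--     return out
--
--
-- def find_swing_points(prices, window=5):
--     n = len(prices)
--     if n < window * 2 + 1:
--         return []
--     wmax = _window_bests(prices, window, lambda a, b: a <= b)
--     wmin = _window_bests(prices, window, lambda a, b: a >= b)
--     swing_points = []
--     for i in range(window, n - window):
--         p = prices[i]
--         if p > wmax[i - window] and p > wmax[i + 1]:
--             swing_points.append(('high', i, p))
--         elif p < wmin[i - window] and p < wmin[i + 1]:
--             swing_points.append(('low', i, p))
--     return swing_points
-- ===== Notes on version B (the rewrite author's own statement) =====
-- stated objective: alternative
-- what changed: Replaces the per-center slice + max/min rescans by two monotonic-deque passes that precompute all window maxima and minima once, then classifies each center with four array lookups.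
import Mathlib
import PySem

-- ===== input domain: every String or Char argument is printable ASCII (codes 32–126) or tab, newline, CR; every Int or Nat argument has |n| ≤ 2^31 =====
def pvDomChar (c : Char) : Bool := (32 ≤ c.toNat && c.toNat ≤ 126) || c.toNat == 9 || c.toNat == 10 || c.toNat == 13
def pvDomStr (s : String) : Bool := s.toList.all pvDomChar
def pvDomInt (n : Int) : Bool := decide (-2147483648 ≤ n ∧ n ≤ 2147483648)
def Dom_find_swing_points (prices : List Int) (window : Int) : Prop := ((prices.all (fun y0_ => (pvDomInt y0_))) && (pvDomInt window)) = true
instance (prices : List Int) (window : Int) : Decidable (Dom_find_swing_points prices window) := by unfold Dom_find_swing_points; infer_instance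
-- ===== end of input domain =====

-- B precomputes all sliding-window maxima/minima with two monotonic-deque passes instead
-- of rescanning a slice per center; equivalence of return values proved on Pre_.

-- ===== PORT A =====
def find_swing_points (prices : List Int) (window : Int) : List (String × Int × Int) :=
  if (prices.length : Int) < window * 2 + 1 then []
  else
    (PySem.List.pyRange window ((prices.length : Int) - window) 1).foldl
      (fun acc i =>
        let left := PySem.List.slice prices (some (i - window)) (some i)
        let right := PySem.List.slice prices (some (i + 1)) (some (i + window + 1))
        let cur := PySem.List.pyGetD prices i 0
        match PySem.List.max? left (fun x => x), PySem.List.max? right (fun x => x),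
              PySem.List.min? left (fun x => x), PySem.List.min? right (fun x => x) with
        | some ml, some mr, some nl, some nr =>
            if cur > ml ∧ cur > mr then acc ++ [("high", i, cur)]
            else if cur < nl ∧ cur < nr then acc ++ [("low", i, cur)]
            else acc
        | _, _, _, _ => acc)   -- max()/min() of an empty slice: Python raises ValueError (outside Pre_)
      []

-- ===== PORT B =====
-- 'while dq and dominated(prices[dq[-1]], v): dq.pop()'
def pvPopBack (prices : List Int) (dominated : Int → Int → Bool) (v : Int) (dq : List Int) : List Int :=
  match hdq : dq.getLast? with
  | none => dq
  | some j =>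
    if dominated (PySem.List.pyGetD prices j 0) v then
      pvPopBack prices dominated v dq.dropLast
    else dq
termination_by dq.length
decreasing_by
  have hne : dq ≠ [] := by intro h; subst h; simp at hdq
  have : 0 < dq.length := List.length_pos_iff.mpr hne
  simp [List.length_dropLast]; omega

-- one iteration of the 'for i, v in enumerate(prices)' loop of _window_bests
def pvWinStep (prices : List Int) (w : Int) (dominated : Int → Int → Bool)
    (st : List Int × List Int) (iv : Int × Int) : List Int × List Int :=
  let dq1 := pvPopBack prices dominated iv.2 st.1
  let dq2 := dq1 ++ [iv.1]
  let dq3 := if dq2.headD 0 ≤ iv.1 - w then dq2.drop 1 else dq2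
  let out := if iv.1 ≥ w - 1 then st.2 ++ [PySem.List.pyGetD prices (dq3.headD 0) 0] else st.2
  (dq3, out)

def pvWindowBests (prices : List Int) (w : Int) (dominated : Int → Int → Bool) : List Int :=
  ((PySem.List.enumerate prices 0).foldl (pvWinStep prices w dominated) ([], [])).2

def find_swing_points_alt (prices : List Int) (window : Int) : List (String × Int × Int) :=
  if (prices.length : Int) < window * 2 + 1 then []
  else
    let wmax := pvWindowBests prices window (fun a b => decide (a ≤ b))
    let wmin := pvWindowBests prices window (fun a b => decide (b ≤ a))
    (PySem.List.pyRange window ((prices.length : Int) - window) 1).foldl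
      (fun acc i =>
        let p := PySem.List.pyGetD prices i 0
        if p > PySem.List.pyGetD wmax (i - window) 0 ∧ p > PySem.List.pyGetD wmax (i + 1) 0 then
          acc ++ [("high", i, p)]
        else if p < PySem.List.pyGetD wmin (i - window) 0 ∧ p < PySem.List.pyGetD wmin (i + 1) 0 then
          acc ++ [("low", i, p)]
        else acc)
      []

-- ===== PRECONDITION & SPEC =====
-- Pre_ excludes exactly the inputs on which A raises ValueError (max() of an empty
-- slice): window ≤ 0 with a list long enough to enter the loop (B raises IndexError there too).
def Pre_find_swing_points (prices : List Int) (window : Int) : Prop :=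
  1 ≤ window ∨ (prices.length : Int) < window * 2 + 1
instance (prices : List Int) (window : Int) : Decidable (Pre_find_swing_points prices window) := by
  unfold Pre_find_swing_points; infer_instance

def pvWitness_find_swing_points : List Int × Int := ([1, 3, 1, 0, 2, 0, 1], 1)

def Spec_find_swing_points (prices : List Int) (window : Int) (out : List (String × Int × Int)) : Prop := out = find_swing_points_alt prices window
instance (prices : List Int) (window : Int) (out : List (String × Int × Int)) : Decidable (Spec_find_swing_points prices window out) := by unfold Spec_find_swing_points; infer_instance

-- ===== CLAIM (what is proved, stated in full; the proofs are below) =====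
def Claim_equal_find_swing_points : Prop := ∀ (prices : List Int) (window : Int), Dom_find_swing_points prices window → Pre_find_swing_points prices window → Spec_find_swing_points prices window (find_swing_points prices window)

-- ===== LEMMAS AND PROOFS =====

def pvV (prices : List Int) (j : Int) : Int := PySem.List.pyGetD prices j 0
theorem pvPopBack_spec (prices : List Int) (le : Int → Int → Bool) (v : Int) (dq : List Int) :
    (pvPopBack prices le v dq).IsPrefix dq
    ∧ (∀ j ∈ dq, j ∈ pvPopBack prices le v dq ∨ le (pvV prices j) v = true)
    ∧ (∀ j, (pvPopBack prices le v dq).getLast? = some j → le (pvV prices j) v = false) := by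
  fun_induction pvPopBack prices le v dq with
  | case1 dq hdq =>
      refine ⟨List.prefix_refl _, fun j hj => Or.inl hj, ?_⟩
      intro j hj; rw [hdq] at hj; exact absurd hj (by simp)
  | case2 dq j hdq hdom ih =>
      obtain ⟨ih1, ih2, ih3⟩ := ih
      have hpre : dq.dropLast.IsPrefix dq := List.dropLast_prefix dq
      refine ⟨ih1.trans hpre, ?_, ih3⟩
      intro x hx
      have hne : dq ≠ [] := by intro h; subst h; simp at hdq
      have hj : dq.getLast hne = j := by
        have := List.getLast?_eq_some_getLast hne
        rw [hdq] at this; exact (Option.some.inj this).symm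
      have heq : dq.dropLast ++ [j] = dq := by
        rw [← hj]; exact List.dropLast_append_getLast hne
      rw [← heq] at hx
      rcases List.mem_append.mp hx with h | h
      · exact ih2 x h
      · right
        have : x = j := by simpa using h
        subst this; simpa [pvV] using hdom
  | case3 dq j hdq hdom =>
      refine ⟨List.prefix_refl _, fun x hx => Or.inl hx, ?_⟩
      intro x hx; rw [hdq] at hx
      exact (Option.some.inj hx) ▸ (by simpa [pvV] using hdom)

def pvBest (le : Int → Int → Bool) (xs : List Int) (m : Int) : Prop :=
  m ∈ xs ∧ ∀ x ∈ xs, le x m = true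

def pvInv (prices : List Int) (w : Int) (le : Int → Int → Bool) (t : Nat)
    (st : List Int × List Int) : Prop :=
  st.2.length = t + 1 - w.toNat
  ∧ (∀ j : Nat, j < st.2.length → pvBest le ((prices.drop j).take w.toNat) (st.2.getD j 0))
  ∧ (∀ x ∈ st.1, (t : Int) - w ≤ x ∧ 0 ≤ x ∧ x < (t : Int))
  ∧ st.1.Pairwise (fun a b => a < b ∧ le (pvV prices a) (pvV prices b) = false)
  ∧ (∀ k : Int, (t : Int) - w ≤ k → 0 ≤ k → k < (t : Int) →
      ∃ j ∈ st.1, k ≤ j ∧ le (pvV prices k) (pvV prices j) = true)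

theorem pvMemWindow (prices : List Int) (j m k : Nat) (h1 : j ≤ k) (h2 : k < j + m)
    (h3 : k < prices.length) : prices.getD k 0 ∈ (prices.drop j).take m := by
  have hk : prices.getD k 0 = prices[k] := List.getD_eq_getElem _ _ h3
  have h4 : k - j < (prices.drop j).length := by simp [List.length_drop]; omega
  have h5 : ((prices.drop j).take m)[k - j]? = some prices[k] := by
    rw [List.getElem?_take]
    simp only [if_pos (by omega : k - j < m)]
    rw [List.getElem?_drop]
    have : j + (k - j) = k := by omega
    rw [this, List.getElem?_eq_getElem h3]
  rw [hk]
  exact List.mem_of_getElem? h5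

theorem pvWindowElem (prices : List Int) (j m : Nat) (x : Int)
    (hx : x ∈ (prices.drop j).take m) :
    ∃ k : Nat, j ≤ k ∧ k < j + m ∧ k < prices.length ∧ x = prices.getD k 0 := by
  obtain ⟨i, hi, hix⟩ := List.mem_iff_getElem.mp hx
  have hi1 : i < m := by
    have := List.length_take (l := prices.drop j) (i := m); omega
  have hi2 : j + i < prices.length := by
    have h := hi
    simp [List.length_take, List.length_drop] at h
    omega
  refine ⟨j + i, by omega, by omega, hi2, ?_⟩
  rw [List.getD_eq_getElem _ _ hi2, ← hix]
  rw [List.getElem_take, List.getElem_drop]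

theorem pvHeadD_eq_head (l : List Int) (h : l ≠ []) : l.headD 0 = l.head h := by
  cases l with
  | nil => exact absurd rfl h
  | cons a t => rfl

theorem pvHeadD_cons_tail (l : List Int) (h : l ≠ []) : l.headD 0 :: l.tail = l := by
  rw [pvHeadD_eq_head l h]; exact List.cons_head_tail h

theorem pvHeadD_mem (l : List Int) (h : l ≠ []) : l.headD 0 ∈ l := by
  rw [pvHeadD_eq_head l h]; exact List.head_mem h

theorem pvInv_step (prices : List Int) (w : Int) (le : Int → Int → Bool)
    (hrefl : ∀ a, le a a = true)
    (htot : ∀ a b, le a b = true ∨ le b a = true)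
    (htrans : ∀ a b c, le a b = true → le b c = true → le a c = true)
    (hw : 1 ≤ w) (t : Nat) (ht : t < prices.length) (st : List Int × List Int)
    (hinv : pvInv prices w le t st) :
    pvInv prices w le (t + 1) (pvWinStep prices w le st ((t : Int), prices.getD t 0)) := by
  obtain ⟨dq, out⟩ := st
  obtain ⟨hlen, hout, hmem, hpair, hdom⟩ := hinv
  simp only at hlen hout hmem hpair hdom
  simp only [pvWinStep]
  set x := prices.getD t 0 with hxdef
  have hxv : pvV prices (t : Int) = x := by simp [pvV, hxdef]
  obtain ⟨hp1, hp2, hp3⟩ := pvPopBack_spec prices le x dq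
  set dq1 := pvPopBack prices le x dq with hdq1
  have hsub1 : ∀ j ∈ dq1, j ∈ dq := fun j hj => hp1.sublist.mem hj
  have hpair1 : dq1.Pairwise (fun a b => a < b ∧ le (pvV prices a) (pvV prices b) = false) :=
    hpair.sublist hp1.sublist
  have hF3 : ∀ j ∈ dq1, le (pvV prices j) x = false := by
    intro j hj
    have hne : dq1 ≠ [] := by intro h; rw [h] at hj; simp at hj
    have hl := List.getLast?_eq_some_getLast hne
    set l := dq1.getLast hne with hldef
    have hlf := hp3 l hl
    by_cases hjl : j = l
    · exact hjl ▸ hlf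
    · have hsplit : dq1.dropLast ++ [l] = dq1 := List.dropLast_append_getLast hne
      have hjd : j ∈ dq1.dropLast := by
        rw [← hsplit] at hj
        rcases List.mem_append.mp hj with h | h
        · exact h
        · exact absurd (by simpa using h) hjl
      have hR : j < l ∧ le (pvV prices j) (pvV prices l) = false := by
        have hp := hpair1
        rw [← hsplit] at hp
        exact (List.pairwise_append.mp hp).2.2 j hjd l (by simp)
      cases hc : le (pvV prices j) x with
      | false => rfl
      | true =>
        have h1 : le (pvV prices l) (pvV prices j) = true := by
          rcases htot (pvV prices l) (pvV prices j) with h | h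
          · exact h
          · exact absurd h (by simp [hR.2])
        exact absurd (htrans _ _ _ h1 hc) (by simp [hlf])
  set dq2 := dq1 ++ [(t : Int)] with hdq2
  have hne2 : dq2 ≠ [] := by simp [hdq2]
  have hmem2 : ∀ a ∈ dq2, (t : Int) - w ≤ a ∧ 0 ≤ a ∧ a ≤ (t : Int) := by
    intro a ha
    rcases List.mem_append.mp ha with h | h
    · have := hmem a (hsub1 a h); omega
    · have : a = (t : Int) := by simpa using h
      omega
  have hpair2 : dq2.Pairwise (fun a b => a < b ∧ le (pvV prices a) (pvV prices b) = false) := by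
    rw [hdq2, List.pairwise_append]
    refine ⟨hpair1, List.pairwise_singleton _ _, ?_⟩
    intro a ha b hb
    have hb' : b = (t : Int) := by simpa using hb
    subst hb'
    exact ⟨(hmem a (hsub1 a ha)).2.2, hxv ▸ hF3 a ha⟩
  have hcons2 : dq2.headD 0 :: dq2.tail = dq2 := pvHeadD_cons_tail dq2 hne2
  have hpc2 : ∀ a ∈ dq2.tail, dq2.headD 0 < a ∧ le (pvV prices (dq2.headD 0)) (pvV prices a) = false := by
    have hp := hpair2
    rw [← hcons2] at hp
    exact (List.pairwise_cons.mp hp).1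
  set dq3 := if dq2.headD 0 ≤ (t : Int) - w then dq2.drop 1 else dq2 with hdq3
  have hpop_shape : dq2.headD 0 ≤ (t : Int) - w → ∃ hh r, dq1 = hh :: r ∧ dq2.drop 1 = r ++ [(t : Int)] := by
    intro hpop
    cases hc : dq1 with
    | nil =>
      exfalso
      have h1 : dq2 = [(t : Int)] := by rw [hdq2, hc]; simp
      rw [h1] at hpop
      simp at hpop
      omega
    | cons hh r =>
      refine ⟨hh, r, rfl, ?_⟩
      rw [hdq2, hc]
      simp
  have hsub3 : ∀ a ∈ dq3, a ∈ dq2 := by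
    intro a ha
    rw [hdq3] at ha
    split_ifs at ha with hpop
    · exact List.mem_of_mem_drop ha
    · exact ha
  have hpair3 : dq3.Pairwise (fun a b => a < b ∧ le (pvV prices a) (pvV prices b) = false) := by
    rw [hdq3]; split_ifs
    · exact hpair2.sublist (List.drop_sublist 1 dq2)
    · exact hpair2
  have hne3 : dq3 ≠ [] := by
    rw [hdq3]; split_ifs with hpop
    · obtain ⟨hh, r, _, h2⟩ := hpop_shape hpop
      rw [h2]; simp
    · exact hne2
  have hlast3 : dq3.getLast? = some (t : Int) := by
    rw [hdq3]; split_ifs with hpop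
    · obtain ⟨hh, r, _, h2⟩ := hpop_shape hpop
      rw [h2]; exact List.getLast?_concat
    · rw [hdq2]; exact List.getLast?_concat
  have htmem3 : (t : Int) ∈ dq3 := List.mem_of_getLast? hlast3
  have hmem3 : ∀ a ∈ dq3, (t : Int) + 1 - w ≤ a ∧ 0 ≤ a ∧ a < (t : Int) + 1 := by
    intro a ha
    have h2 := hmem2 a (hsub3 a ha)
    rw [hdq3] at ha
    split_ifs at ha with hpop
    · rw [List.drop_one] at ha
      have hhead := hmem2 _ (pvHeadD_mem dq2 hne2)
      have := (hpc2 a ha).1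
      omega
    · rw [← hcons2] at ha
      have hhead := hmem2 _ (pvHeadD_mem dq2 hne2)
      rcases List.mem_cons.mp ha with h | h
      · omega
      · have := (hpc2 a h).1
        omega
  have hdom3 : ∀ k : Int, (t : Int) + 1 - w ≤ k → 0 ≤ k → k < (t : Int) + 1 →
      ∃ j ∈ dq3, k ≤ j ∧ le (pvV prices k) (pvV prices j) = true := by
    intro k hk1 hk2 hk3
    by_cases hkt : k = (t : Int)
    · exact ⟨(t : Int), htmem3, by omega, by rw [hkt]; exact hrefl _⟩
    · obtain ⟨j, hj, hkj, hlekj⟩ := hdom k (by omega) hk2 (by omega)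
      rcases hp2 j hj with hj1 | hj2
      · have hj2' : j ∈ dq2 := by rw [hdq2]; exact List.mem_append_left _ hj1
        have hj3 : j ∈ dq3 := by
          rw [hdq3]; split_ifs with hpop
          · rw [List.drop_one]
            rw [← hcons2] at hj2'
            rcases List.mem_cons.mp hj2' with h | h
            · exfalso; omega
            · exact h
          · exact hj2'
        exact ⟨j, hj3, hkj, hlekj⟩
      · exact ⟨(t : Int), htmem3, by omega, htrans _ _ _ hlekj (hxv ▸ hj2)⟩
  have hhead3 : dq3.headD 0 ∈ dq3 := pvHeadD_mem dq3 hne3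
  have hbest3 : ∀ a ∈ dq3, le (pvV prices a) (pvV prices (dq3.headD 0)) = true := by
    intro a ha
    rw [← pvHeadD_cons_tail dq3 hne3] at ha
    have hp := hpair3
    rw [← pvHeadD_cons_tail dq3 hne3] at hp
    rcases List.mem_cons.mp ha with h | h
    · rw [h]; exact hrefl _
    · have hr := (List.pairwise_cons.mp hp).1 a h
      rcases htot (pvV prices a) (pvV prices (dq3.headD 0)) with hh | hh
      · exact hh
      · rw [hr.2] at hh; simp at hh
  have hwt : ((w.toNat : Int)) = w := Int.toNat_of_nonneg (by omega)
  refine ⟨?_, ?_, ?_, ?_, ?_⟩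
  · -- length
    simp only
    split_ifs with hw2
    · simp only [List.length_append, List.length_singleton, hlen]
      omega
    · simp only [hlen]
      omega
  · -- best entries
    simp only
    split_ifs with hw2
    · intro j hjlen
      simp only [List.length_append, List.length_singleton, hlen] at hjlen
      by_cases hjold : j < out.length
      · rw [List.getD_append _ _ _ _ hjold]
        exact hout j hjold
      · have hjeq : j = out.length := by omega
        have hval : (out ++ [PySem.List.pyGetD prices (dq3.headD 0) 0]).getD j 0
            = PySem.List.pyGetD prices (dq3.headD 0) 0 := by
          subst hjeq
          rw [List.getD_eq_getElem?_getD, List.getElem?_append_right (by omega)]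
          simp
        rw [hval]
        have hh3 := hmem3 _ hhead3
        have hjw : j = t + 1 - w.toNat := by omega
        have hjwi : (j : Int) = (t : Int) + 1 - w := by omega
        have hb1 : (dq3.headD 0).toNat < prices.length := by omega
        have hgd : PySem.List.pyGetD prices (dq3.headD 0) 0 = prices.getD (dq3.headD 0).toNat 0 := by
          rw [PySem.List.pyGetD_eq_getElem prices 0 (by omega) (by omega),
              List.getD_eq_getElem _ _ hb1]
        constructor
        · -- membership in window
          rw [hgd]
          exact pvMemWindow prices j w.toNat (dq3.headD 0).toNat (by omega) (by omega) (by omega)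
        · intro y hy
          obtain ⟨k, hk1, hk2, hk3, hk4⟩ := pvWindowElem prices j w.toNat y hy
          obtain ⟨jj, hjj, hkjj, hlejj⟩ := hdom3 (k : Int) (by omega) (by omega) (by omega)
          have h5 : pvV prices (k : Int) = y := by simp [pvV, hk4]
          have h6 : pvV prices (dq3.headD 0) = PySem.List.pyGetD prices (dq3.headD 0) 0 := rfl
          rw [← h5, ← h6]
          exact htrans _ _ _ hlejj (hbest3 jj hjj)
    · intro j hjlen
      exact hout j hjlen
  · -- membership bounds
    simp only
    intro a ha
    have := hmem3 a ha
    push_cast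
    omega
  · -- pairwise
    exact hpair3
  · -- domination
    simp only
    intro k h1 h2 h3
    have := hdom3 k (by push_cast at h1 ⊢; omega) h2 (by push_cast at h3 ⊢; omega)
    exact this

theorem pvFold_inv (prices : List Int) (w : Int) (le : Int → Int → Bool)
    (hrefl : ∀ a, le a a = true)
    (htot : ∀ a b, le a b = true ∨ le b a = true)
    (htrans : ∀ a b c, le a b = true → le b c = true → le a c = true)
    (hw : 1 ≤ w) :
    ∀ (suf : List Int) (t : Nat) (st : List Int × List Int),
      prices.drop t = suf → pvInv prices w le t st →
      pvInv prices w le (t + suf.length)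
        ((PySem.List.enumerate suf (t : Int)).foldl (pvWinStep prices w le) st) := by
  intro suf
  induction suf with
  | nil => intro t st _ h; simpa [PySem.List.enumerate] using h
  | cons y rest ih =>
    intro t st hdrop hinv
    have ht : t < prices.length := by
      have := congrArg List.length hdrop
      simp [List.length_drop] at this
      omega
    have hy : y = prices.getD t 0 := by
      have h1 : (prices.drop t).head? = some y := by rw [hdrop]; rfl
      rw [List.head?_drop] at h1
      rw [List.getD_eq_getElem?_getD, h1]
      rfl
    have hstep := pvInv_step prices w le hrefl htot htrans hw t ht st hinv
    have hdrop' : prices.drop (t + 1) = rest := by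
      have : prices.drop (t + 1) = (prices.drop t).drop 1 := by
        rw [List.drop_drop]
      rw [this, hdrop]
      rfl
    have hrec := ih (t + 1) _ hdrop' hstep
    rw [PySem.List.enumerate_cons, List.foldl_cons]
    have hcast : ((t : Int) + 1) = (((t + 1 : Nat)) : Int) := by push_cast; ring
    rw [← hy] at hstep
    rw [← hy] at hrec
    have hlen : (t + (y :: rest).length) = (t + 1) + rest.length := by simp; omega
    rw [hlen, hcast]
    exact hrec

theorem pvWindowBests_spec (prices : List Int) (w : Int) (le : Int → Int → Bool)
    (hrefl : ∀ a, le a a = true)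
    (htot : ∀ a b, le a b = true ∨ le b a = true)
    (htrans : ∀ a b c, le a b = true → le b c = true → le a c = true)
    (hw : 1 ≤ w) :
    (pvWindowBests prices w le).length = prices.length + 1 - w.toNat
    ∧ ∀ j : Nat, j + w.toNat ≤ prices.length →
        pvBest le ((prices.drop j).take w.toNat) ((pvWindowBests prices w le).getD j 0) := by
  have hinit : pvInv prices w le 0 ([], []) := by
    refine ⟨by simp; omega, ?_, by simp, by simp, ?_⟩
    · intro j hj; simp at hj
    · intro k h1 h2 h3; omega
  have h := pvFold_inv prices w le hrefl htot htrans hw prices 0 ([], []) (by simp) hinit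
  simp only [Nat.zero_add, Nat.cast_zero] at h
  obtain ⟨hlen, hout, _, _, _⟩ := h
  have hw1 : 1 ≤ w.toNat := by omega
  refine ⟨hlen, ?_⟩
  intro j hj
  exact hout j (by rw [hlen]; omega)

theorem pvMax_of_best (xs : List Int) (m : Int)
    (h : pvBest (fun a b => decide (a ≤ b)) xs m) :
    PySem.List.max? xs (fun x => x) = some m := by
  obtain ⟨hm, hall⟩ := h
  have hne : xs ≠ [] := by intro h; rw [h] at hm; simp at hm
  obtain ⟨m', hm'⟩ : ∃ m', PySem.List.max? xs (fun x => x) = some m' := by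
    cases hx : PySem.List.max? xs (fun x => x) with
    | none => exact absurd (((PySem.List.max?_eq_none_iff _ _).mp hx)) hne
    | some m' => exact ⟨m', rfl⟩
  have h1 : m' ∈ xs := PySem.List.max?_mem hm'
  have h2 : m ≤ m' := PySem.List.max?_isMax hm' m hm
  have h3 : m' ≤ m := by have := hall m' h1; simpa using this
  rw [hm']
  congr 1
  omega

theorem pvMin_of_best (xs : List Int) (m : Int)
    (h : pvBest (fun a b => decide (b ≤ a)) xs m) :
    PySem.List.min? xs (fun x => x) = some m := by
  obtain ⟨hm, hall⟩ := h
  have hne : xs ≠ [] := by intro h; rw [h] at hm; simp at hm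
  obtain ⟨m', hm'⟩ : ∃ m', PySem.List.min? xs (fun x => x) = some m' := by
    cases hx : PySem.List.min? xs (fun x => x) with
    | none => exact absurd (((PySem.List.min?_eq_none_iff _ _).mp hx)) hne
    | some m' => exact ⟨m', rfl⟩
  have h1 : m' ∈ xs := PySem.List.min?_mem hm'
  have h2 : m' ≤ m := PySem.List.min?_isMin hm' m hm
  have h3 : m ≤ m' := by have := hall m' h1; simpa using this
  rw [hm']
  congr 1
  omega

-- ===== VERDICT (by name: the statement is the Claim_ definition above) =====
theorem find_swing_points_spec : Claim_equal_find_swing_points := by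
  intro prices window hdom hpre
  unfold Spec_find_swing_points
  unfold find_swing_points find_swing_points_alt
  by_cases hg : (prices.length : Int) < window * 2 + 1
  · rw [if_pos hg, if_pos hg]
  · rw [if_neg hg, if_neg hg]
    have hw : 1 ≤ window := by
      rcases hpre with h | h
      · exact h
      · exact absurd h hg
    simp only []
    apply PySem.List.foldl_congr_mem
    intro acc i hi
    rw [PySem.List.mem_pyRange_one] at hi
    obtain ⟨hi1, hi2⟩ := hi
    have hmaxspec := pvWindowBests_spec prices window (fun a b => decide (a ≤ b))
      (by intro a; simp) (by intro a b; by_cases h : a ≤ b <;> simp [h] <;> omega)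
      (by intro a b c h1 h2; simp at h1 h2 ⊢; omega) hw
    have hminspec := pvWindowBests_spec prices window (fun a b => decide (b ≤ a))
      (by intro a; simp) (by intro a b; by_cases h : b ≤ a <;> simp [h] <;> omega)
      (by intro a b c h1 h2; simp at h1 h2 ⊢; omega) hw
    set j1 := (i - window).toNat with hj1
    set j2 := (i + 1).toNat with hj2
    have hj1i : ((j1 : Int)) = i - window := by omega
    have hj2i : ((j2 : Int)) = i + 1 := by omega
    have hb1 : j1 + window.toNat ≤ prices.length := by omega
    have hb2 : j2 + window.toNat ≤ prices.length := by omega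
    have hleft : PySem.List.slice prices (some (i - window)) (some i)
        = (prices.drop j1).take window.toNat := by
      rw [PySem.List.slice_toNat prices (by omega) (by omega)]
      congr 1
      omega
    have hright : PySem.List.slice prices (some (i + 1)) (some (i + window + 1))
        = (prices.drop j2).take window.toNat := by
      rw [PySem.List.slice_toNat prices (by omega) (by omega)]
      congr 1
      omega
    have hmax1 := pvMax_of_best _ _ (hmaxspec.2 j1 hb1)
    have hmax2 := pvMax_of_best _ _ (hmaxspec.2 j2 hb2)
    have hmin1 := pvMin_of_best _ _ (hminspec.2 j1 hb1)
    have hmin2 := pvMin_of_best _ _ (hminspec.2 j2 hb2)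
    have hg1 : PySem.List.pyGetD (pvWindowBests prices window fun a b => decide (a ≤ b)) (i - window) 0
        = (pvWindowBests prices window fun a b => decide (a ≤ b)).getD j1 0 := by
      rw [← hj1i, PySem.List.pyGetD_natCast]
    have hg2 : PySem.List.pyGetD (pvWindowBests prices window fun a b => decide (a ≤ b)) (i + 1) 0
        = (pvWindowBests prices window fun a b => decide (a ≤ b)).getD j2 0 := by
      rw [← hj2i, PySem.List.pyGetD_natCast]
    have hg3 : PySem.List.pyGetD (pvWindowBests prices window fun a b => decide (b ≤ a)) (i - window) 0
        = (pvWindowBests prices window fun a b => decide (b ≤ a)).getD j1 0 := by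
      rw [← hj1i, PySem.List.pyGetD_natCast]
    have hg4 : PySem.List.pyGetD (pvWindowBests prices window fun a b => decide (b ≤ a)) (i + 1) 0
        = (pvWindowBests prices window fun a b => decide (b ≤ a)).getD j2 0 := by
      rw [← hj2i, PySem.List.pyGetD_natCast]
    simp only [hleft, hright, hmax1, hmax2, hmin1, hmin2, hg1, hg2, hg3, hg4]
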